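-- pv_equiv track=rewrite | github.com/AndreiChertkov/teneva | teneva/collection/vectors.py | _index_expand
-- ===== SOURCE A (Python) =====
-- def _index_expand(q, i):
--     if i < 0:
--         if i == -1:
--             ind = [1] * q
--         else:
--             raise ValueError('Only "-1" is supported for negative indices.')
--     else:
--         ind = []
--         for _ in range(q):
--             ind.append(i % 2)
--             i = int(i / 2)
--         if i > 0:
--             raise ValueError('Index is out of range.')
--
--     return ind
-- ===== SOURCE B (Python) =====
-- def _index_expand(q, i):
--     if i < 0:
--         if i == -1:
--             return [1] * q
--         raise ValueError('Only "-1" is supported for negative indices.')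
--     if q < 0:
--         q = 0
--     if i >= (1 << q):
--         raise ValueError('Index is out of range.')
--     s = format(i, 'b').zfill(q)[::-1]
--     return [int(c) for c in s[:q]]
-- ===== Notes on version B (the rewrite author's own statement) =====
-- stated objective: alternative
-- what changed: B replaces A's repeated i%2 / i=int(i/2) accumulation loop by a single closed-form range check (i >= 1<<q) plus traversal of the precomputed reversed binary string format(i,'b').zfill(q)[::-1]; Pre_ excludes exactly the inputs where A raises ValueError (i < -1, or i >= 2**max(q,0)).
import Mathlib
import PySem

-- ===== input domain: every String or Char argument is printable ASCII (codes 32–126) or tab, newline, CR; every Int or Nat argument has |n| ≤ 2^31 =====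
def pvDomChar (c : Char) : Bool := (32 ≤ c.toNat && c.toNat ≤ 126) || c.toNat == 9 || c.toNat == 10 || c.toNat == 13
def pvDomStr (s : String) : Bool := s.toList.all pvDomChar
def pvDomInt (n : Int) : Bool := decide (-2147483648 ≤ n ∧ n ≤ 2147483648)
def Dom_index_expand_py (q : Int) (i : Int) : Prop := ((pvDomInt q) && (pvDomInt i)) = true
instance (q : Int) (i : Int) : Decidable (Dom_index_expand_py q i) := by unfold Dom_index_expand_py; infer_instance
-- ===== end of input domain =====

-- B replaces A's repeated (i % 2, i = int(i/2)) accumulation loop by a closed-form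
-- range check plus traversal of the precomputed reversed zero-filled binary string
-- (objective: alternative decomposition, same asymptotic cost).


-- ===== PORT A =====
-- literal port of A: for i ≥ 0 run the range(q) loop appending i % 2 and halving i
-- (int(i/2) is truncating division = Int.tdiv; exact here since Pre_ gives i ≥ 0).
-- The two `raise ValueError` branches (i < -1, and leftover i > 0 after the loop)
-- are excluded by Pre_; the port returns [] there merely to be total.
def index_expand_py (q : Int) (i : Int) : List Int :=
  if i < 0 then
    if i = -1 then List.replicate q.toNat 1
    else []  -- raise ValueError (outside Pre_)
  else
    let st := (PySem.List.pyRange 0 q 1).foldl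
      (fun (st : List Int × Int) _ => (st.1 ++ [st.2 % 2], st.2.tdiv 2)) ([], i)
    if st.2 > 0 then []  -- raise ValueError (outside Pre_)
    else st.1

-- ===== PORT B =====
-- format(n, 'b') for n > 0: big-endian binary digits, no leading zeros (hand port, exact on Nat).
def binChars (n : Nat) : List Char :=
  if n = 0 then [] else binChars (n / 2) ++ [if n % 2 = 1 then '1' else '0']

-- port of B: check i ≥ 1<<q in closed form (raise, outside Pre_), then map int(c)
-- over format(i,'b').zfill(q)[::-1][:q]; int(c) on the digits '0'/'1' is the if below.
def index_expand_py_alt (q : Int) (i : Int) : List Int :=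
  if i < 0 then
    if i = -1 then List.replicate q.toNat 1
    else []  -- raise ValueError (outside Pre_)
  else
    let q' : Int := if q < 0 then 0 else q
    if i ≥ 2 ^ q'.toNat then []  -- raise ValueError (outside Pre_)
    else
      let fmt : List Char := if i = 0 then ['0'] else binChars i.toNat
      let s := (PySem.Chars.zfill fmt q').reverse
      (s.take q'.toNat).map (fun c => if c = '1' then (1 : Int) else 0)

-- ===== PRECONDITION & SPEC =====
-- Pre_ excludes exactly the inputs where A raises ValueError: i < -1, and i ≥ 2^max(q,0).
def Pre_index_expand_py (q : Int) (i : Int) : Prop :=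
  i = -1 ∨ (0 ≤ i ∧ i < 2 ^ q.toNat)
instance (q : Int) (i : Int) : Decidable (Pre_index_expand_py q i) := by
  unfold Pre_index_expand_py; infer_instance

def pvWitness_index_expand_py : Int × Int := (5, 11)

def Spec_index_expand_py (q : Int) (i : Int) (out : List Int) : Prop := out = index_expand_py_alt q i
instance (q : Int) (i : Int) (out : List Int) : Decidable (Spec_index_expand_py q i out) := by unfold Spec_index_expand_py; infer_instance

-- ===== CLAIM (what is proved, stated in full; the proofs are below) =====
def Claim_equal_index_expand_py : Prop := ∀ (q : Int) (i : Int), Dom_index_expand_py q i → Pre_index_expand_py q i → Spec_index_expand_py q i (index_expand_py q i)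

-- ===== LEMMAS AND PROOFS =====

-- reference value: little-endian bits of m, padded/truncated to length n
def bitsLE : Nat → Nat → List Int
  | 0, _ => []
  | n + 1, m => ((m % 2 : Nat) : Int) :: bitsLE n (m / 2)

theorem bitsLE_zero (n : Nat) : bitsLE n 0 = List.replicate n 0 := by
  induction n with
  | zero => rfl
  | succ n ih => simp [bitsLE, ih, List.replicate_succ]

-- A's loop computes acc ++ bitsLE l.length m
theorem foldlA (l : List Int) (acc : List Int) (m : Nat) :
    (l.foldl (fun (st : List Int × Int) _ => (st.1 ++ [st.2 % 2], st.2.tdiv 2))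
      (acc, (m : Int))).1 = acc ++ bitsLE l.length m := by
  induction l generalizing acc m with
  | nil => simp [bitsLE]
  | cons x xs ih =>
    have h1 : ((m : Int) % 2) = ((m % 2 : Nat) : Int) := by push_cast; ring
    have h2 : (Int.tdiv (m : Int) 2) = ((m / 2 : Nat) : Int) := rfl
    simp only [List.foldl_cons, h1, h2, ih, List.length_cons, bitsLE]
    simp

theorem binChars_length_le (n m : Nat) (h : m < 2 ^ n) : (binChars m).length ≤ n := by
  induction n generalizing m with
  | zero =>
    interval_cases m
    simp [binChars]
  | succ n ih =>
    by_cases hm : m = 0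
    · simp [hm, binChars]
    · rw [binChars, if_neg hm]
      have : m / 2 < 2 ^ n := by
        have := Nat.pow_succ 2 n ▸ h
        omega
      have := ih (m / 2) this
      simp only [List.length_append, List.length_cons, List.length_nil]
      omega

theorem binChars_bits (n m : Nat) (h : m < 2 ^ n) :
    ((binChars m).reverse.map (fun c => if c = '1' then (1 : Int) else 0)) ++
      List.replicate (n - (binChars m).length) 0 = bitsLE n m := by
  induction n generalizing m with
  | zero =>
    interval_cases m
    simp [binChars, bitsLE]
  | succ n ih =>
    by_cases hm : m = 0
    · subst hm
      simp [binChars, bitsLE_zero]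
    · rw [binChars, if_neg hm]
      have hlt : m / 2 < 2 ^ n := by
        have := Nat.pow_succ 2 n ▸ h
        omega
      have hd : (if m % 2 = 1 then '1' else '0') = '1' → ((1 : Int) = ((m % 2 : Nat) : Int)) := by
        rcases Nat.mod_two_eq_zero_or_one m with h2 | h2 <;> simp [h2]
      simp only [List.reverse_append, List.reverse_cons, List.reverse_nil, List.nil_append,
        List.cons_append, List.map_cons, List.length_append, List.length_cons, List.length_nil]
      have hsub : n + 1 - ((binChars (m / 2)).length + 1) = n - (binChars (m / 2)).length := by omega
      rw [hsub, ih (m / 2) hlt, bitsLE]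
      rcases Nat.mod_two_eq_zero_or_one m with h2 | h2 <;> simp [h2]

-- zfill on sign-free digit strings is left-padding with '0'
theorem zfill_digits (cs : List Char) (w : Int)
    (hne : cs ≠ []) (hs : cs.head? ≠ some '+' ∧ cs.head? ≠ some '-') :
    PySem.Chars.zfill cs w = List.replicate (w.toNat - cs.length) '0' ++ cs := by
  cases cs with
  | nil => simp at hne
  | cons c cs' =>
    rcases hs with ⟨h1, h2⟩
    simp only [List.head?] at h1 h2
    have hc : ¬(c = '+' ∨ c = '-') := by
      rintro (h | h) <;> subst h <;> simp at h1 h2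
    simp only [PySem.Chars.zfill, List.length_cons]
    split_ifs with hw
    · have hz : w.toNat - (cs'.length + 1) = 0 := by omega
      rw [hz]; simp
    · rfl

theorem index_expand_py_eq (q i : Int) (hpre : Pre_index_expand_py q i) :
    index_expand_py q i = index_expand_py_alt q i := by
  rcases hpre with h | ⟨h0, hlt⟩
  · subst h
    simp [index_expand_py, index_expand_py_alt]
  · have hni : ¬ i < 0 := by omega
    have hq' : (if q < 0 then (0 : Int) else q).toNat = q.toNat := by
      split <;> omega
    obtain ⟨m, rfl⟩ := Int.eq_ofNat_of_zero_le h0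
    have hmlt : m < 2 ^ q.toNat := by exact_mod_cast hlt
    -- A side
    rw [index_expand_py, if_neg hni]
    have hlen : (PySem.List.pyRange 0 q 1).length = q.toNat := by
      rw [PySem.List.length_pyRange_one]; omega
    have hA := foldlA (PySem.List.pyRange 0 q 1) [] m
    rw [hlen] at hA
    have hA2 : (PySem.List.pyRange 0 q 1).foldl
        (fun (st : List Int × Int) _ => (st.1 ++ [st.2 % 2], st.2.tdiv 2)) ([], (m : Int))
        = (bitsLE q.toNat m,
          ((PySem.List.pyRange 0 q 1).foldl
            (fun (st : List Int × Int) _ => (st.1 ++ [st.2 % 2], st.2.tdiv 2)) ([], (m : Int))).2) := by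
      have hA' := hA
      simp only [List.nil_append] at hA'
      rw [Prod.ext_iff]
      exact ⟨hA', rfl⟩
    -- the leftover value: second component is m after q.toNat halvings, which is m / 2^q.toNat = 0
    have hsnd : ∀ (l : List Int) (acc : List Int) (k : Nat),
        (l.foldl (fun (st : List Int × Int) _ => (st.1 ++ [st.2 % 2], st.2.tdiv 2))
          (acc, (k : Int))).2 = ((k / 2 ^ l.length : Nat) : Int) := by
      intro l
      induction l with
      | nil => intro acc k; simp
      | cons x xs ih =>
        intro acc k
        have h2 : (Int.tdiv (k : Int) 2) = ((k / 2 : Nat) : Int) := rfl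
        simp only [List.foldl_cons, h2, ih, List.length_cons]
        congr 1
        rw [Nat.div_div_eq_div_mul, Nat.pow_succ]
        ring_nf
    have hz : m / 2 ^ q.toNat = 0 := Nat.div_eq_of_lt hmlt
    have hsnd' := hsnd (PySem.List.pyRange 0 q 1) [] m
    rw [hlen, hz] at hsnd'
    rw [hA2, hsnd']
    simp only [Nat.cast_zero, gt_iff_lt, lt_self_iff_false, if_false]
    -- B side
    rw [index_expand_py_alt, if_neg hni]
    simp only
    rw [if_neg (by push_cast [hq']; omega)]
    by_cases hm : m = 0
    · -- i = 0: fmt = ['0']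
      subst hm
      simp only [Nat.cast_zero, Int.toNat_zero, if_true]
      rw [zfill_digits ['0'] _ (by simp) (by simp)]
      simp only [List.length_cons, List.length_nil, List.reverse_append, List.reverse_cons,
        List.reverse_nil, List.nil_append, List.reverse_replicate, List.cons_append]
      rw [hq', bitsLE_zero]
      rcases Nat.eq_zero_or_pos q.toNat with hq0 | hq0
      · simp [hq0]
      · have : ('0' :: List.replicate (q.toNat - 1) '0').take q.toNat
            = List.replicate q.toNat '0' := by
          have h1 : ('0' :: List.replicate (q.toNat - 1) '0') = List.replicate q.toNat '0' := by
            rw [← List.replicate_succ]; congr 1; omega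
          rw [h1]; simp
        rw [this]
        simp [List.map_replicate]
    · -- i > 0: fmt = binChars m
      have him : ((m : Int) = 0) = False := by simp [hm]
      simp only [Int.toNat_natCast, him, if_false]
      have hbne : binChars m ≠ [] := by
        rw [binChars, if_neg hm]; simp
      have hmem : ∀ k c, c ∈ binChars k → c = '0' ∨ c = '1' := by
        intro k
        induction k using Nat.strong_induction_on with
        | _ k ihk =>
          intro c hc
          rw [binChars] at hc
          by_cases hk0 : k = 0
          · simp [hk0] at hc
          · rw [if_neg hk0] at hc
            rcases List.mem_append.mp hc with hc | hc
            · exact ihk (k / 2) (Nat.div_lt_self (Nat.pos_of_ne_zero hk0) one_lt_two) c hc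
            · simp only [List.mem_singleton] at hc
              subst hc; split <;> simp
      have hhead : (binChars m).head? ≠ some '+' ∧ (binChars m).head? ≠ some '-' := by
        constructor
        · intro hcon
          rcases hmem m '+' (List.mem_of_mem_head? (by simp [hcon])) with h | h <;> simp at h
        · intro hcon
          rcases hmem m '-' (List.mem_of_mem_head? (by simp [hcon])) with h | h <;> simp at h
      rw [zfill_digits _ _ hbne hhead]
      rw [hq']
      have hlenle := binChars_length_le q.toNat m hmlt
      simp only [List.reverse_append, List.reverse_replicate]
      have htot : ((binChars m).reverse ++ List.replicate (q.toNat - (binChars m).length) '0').length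
          = q.toNat := by simp; omega
      rw [List.take_of_length_le (le_of_eq htot), List.map_append, List.map_replicate]
      simpa using (binChars_bits q.toNat m hmlt).symm

-- ===== VERDICT (by name: the statement is the Claim_ definition above) =====
theorem index_expand_py_spec : Claim_equal_index_expand_py := by
  intro q i _ hpre
  unfold Spec_index_expand_py
  exact index_expand_py_eq q i hpre
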